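-- pv_equiv track=rewrite | github.com/SleepyTurtle91/extropos | validate-architecture.py | estimate_max_indentation_streak
-- ===== SOURCE A (Python) =====
-- TAB_WIDTH_SPACES = 2
--
-- def estimate_max_indentation_streak(content: str) -> int:
--     previous_depth: int | None = None
--     current_streak = 0
--     max_streak = 0
--
--     for raw_line in content.splitlines():
--         stripped = raw_line.strip()
--         if not stripped:
--             continue
--
--         leading_whitespace = raw_line[: len(raw_line) - len(raw_line.lstrip(" \t"))]
--         expanded = leading_whitespace.replace("\t", " " * TAB_WIDTH_SPACES)
--         depth = len(expanded) // TAB_WIDTH_SPACES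
--
--         if previous_depth is None:
--             current_streak = 0
--         elif depth > previous_depth:
--             current_streak += 1
--         elif depth < previous_depth:
--             current_streak = 0
--
--         if current_streak > max_streak:
--             max_streak = current_streak
--
--         previous_depth = depth
--
--     return max_streak
-- ===== SOURCE B (Python) =====
-- TAB_WIDTH_SPACES = 2
--
-- def estimate_max_indentation_streak(content: str) -> int:
--     # Depths of the non-blank lines (same extraction rules as the original).
--     depths = []
--     for raw in content.splitlines():
--         if raw.strip():
--             lead = raw[: len(raw) - len(raw.lstrip(" \t"))]
--             depths.append(len(lead.replace("\t", " " * TAB_WIDTH_SPACES)) // TAB_WIDTH_SPACES)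
--     # Encode each adjacent step as '+' (deeper), '-' (shallower) or '=' (same),
--     # split the step string at the decreases, and take the largest number of
--     # increases inside one decrease-free run: plateaus ('=') never end a run,
--     # so this is exactly the longest streak of the original.
--     marks = "".join(
--         "+" if b > a else "-" if b < a else "="
--         for a, b in zip(depths, depths[1:])
--     )
--     return max((run.count("+") for run in marks.split("-")), default=0)
-- ===== Notes on version B (the rewrite author's own statement) =====
-- stated objective: alternative
-- what changed: B keeps no streak counter at all: it encodes each adjacent depth step as a plus/minus/equals mark character, splits the mark string at the decrease marks, and returns the largest count of increase marks among the decrease-free runs (max with default 0).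
import Mathlib
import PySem

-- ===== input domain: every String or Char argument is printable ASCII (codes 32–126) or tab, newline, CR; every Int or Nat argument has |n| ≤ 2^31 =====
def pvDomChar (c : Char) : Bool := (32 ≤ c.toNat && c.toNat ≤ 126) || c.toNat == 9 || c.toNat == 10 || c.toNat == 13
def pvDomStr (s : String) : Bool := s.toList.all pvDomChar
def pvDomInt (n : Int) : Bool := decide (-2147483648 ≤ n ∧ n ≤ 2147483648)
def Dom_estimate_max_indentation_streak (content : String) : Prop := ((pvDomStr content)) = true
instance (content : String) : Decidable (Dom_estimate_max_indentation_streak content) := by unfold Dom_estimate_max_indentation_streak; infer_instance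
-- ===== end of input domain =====

-- B drops A's running streak counter entirely: it encodes each adjacent depth step as '+'/'-'/'=',
-- splits that step string at the decreases and returns the largest '+'-count of one decrease-free run.

-- ===== PORT A =====

-- depth of one line: leading " \t" prefix, tabs expanded to 2 spaces, // 2
-- (raw.lstrip(" \t") is dropWhile over the two strip characters — exact)
def pvDepthA (cs : List Char) : Int :=
  let ls := cs.dropWhile (fun c => c == ' ' || c == '\t')
  let leading := PySem.List.slice cs none (some ((cs.length : Int) - (ls.length : Int)))
  let expanded := PySem.Chars.replace leading ['\t'] [' ', ' ']
  PySem.Int.floordiv (expanded.length : Int) 2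

def pvStepA (st : Option Int × Int × Int) (raw : String) : Option Int × Int × Int :=
  if PySem.Chars.strip raw.toList = [] then st
  else
    let depth := pvDepthA raw.toList
    let cur :=
      match st.1 with
      | none => 0
      | some p => if depth > p then st.2.1 + 1 else if depth < p then 0 else st.2.1
    (some depth, cur, if cur > st.2.2 then cur else st.2.2)

def estimate_max_indentation_streak (content : String) : Int :=
  ((PySem.Str.splitlines content).foldl pvStepA (none, 0, 0)).2.2

-- ===== PORT B =====

-- Source B's depth loop body: depth of a non-blank line, none for a blank line
def pvLineDepthB (raw : String) : Option Int :=
  if PySem.Chars.strip raw.toList = [] then none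
  else
    let cs := raw.toList
    let ls := cs.dropWhile (fun c => c == ' ' || c == '\t')
    let leading := PySem.List.slice cs none (some ((cs.length : Int) - (ls.length : Int)))
    some (PySem.Int.floordiv ((PySem.Chars.replace leading ['\t'] [' ', ' ']).length : Int) 2)

-- Source B's step mark for one adjacent pair of depths
def pvMarkB (pd : Int × Int) : Char :=
  if pd.2 > pd.1 then '+' else if pd.2 < pd.1 then '-' else '='

def estimate_max_indentation_streak_alt (content : String) : Int :=
  let depths := (PySem.Str.splitlines content).filterMap pvLineDepthB
  let marks := (depths.zip (PySem.List.slice depths (some 1) none)).map pvMarkB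
  -- max((run.count("+") for run in marks.split("-")), default=0)
  match (PySem.Chars.splitOn marks ['-']).map (fun run => (PySem.Chars.count run ['+'] : Int)) with
  | [] => 0
  | x :: xs => xs.foldl max x

-- ===== PRECONDITION & SPEC =====
def Spec_estimate_max_indentation_streak (content : String) (out : Int) : Prop := out = estimate_max_indentation_streak_alt content
instance (content : String) (out : Int) : Decidable (Spec_estimate_max_indentation_streak content out) := by unfold Spec_estimate_max_indentation_streak; infer_instance

-- ===== CLAIM (what is proved, stated in full; the proofs are below) =====
def Claim_equal_estimate_max_indentation_streak : Prop := ∀ (content : String), Dom_estimate_max_indentation_streak content → Spec_estimate_max_indentation_streak content (estimate_max_indentation_streak content)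

-- ===== LEMMAS AND PROOFS =====

-- A's step on the depth alone (blank lines already removed)
def pvStepD (st : Option Int × Int × Int) (d : Int) : Option Int × Int × Int :=
  let cur :=
    match st.1 with
    | none => 0
    | some p => if d > p then st.2.1 + 1 else if d < p then 0 else st.2.1
  (some d, cur, if cur > st.2.2 then cur else st.2.2)

theorem pvStepA_eq (st : Option Int × Int × Int) (raw : String) :
    pvStepA st raw = if PySem.Chars.strip raw.toList = [] then st else pvStepD st (pvDepthA raw.toList) := by
  simp [pvStepA, pvStepD]

theorem pvLineDepthB_eq (raw : String) :
    pvLineDepthB raw = if PySem.Chars.strip raw.toList = [] then none else some (pvDepthA raw.toList) := by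
  simp [pvLineDepthB, pvDepthA]

theorem foldA_filterMap (lines : List String) (st : Option Int × Int × Int) :
    lines.foldl pvStepA st = (lines.filterMap pvLineDepthB).foldl pvStepD st := by
  induction lines generalizing st with
  | nil => rfl
  | cons l ls ih =>
      by_cases h : PySem.Chars.strip l.toList = []
      · simp [pvLineDepthB_eq, pvStepA_eq, h, ih]
      · simp [pvLineDepthB_eq, pvStepA_eq, h, ih]

-- A's streak logic replayed on the marks alone
def pvRunStep (st : Int × Int) (m : Char) : Int × Int :=
  let c := if m = '+' then st.1 + 1 else if m = '-' then 0 else st.1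
  (c, if c > st.2 then c else st.2)

theorem pvRunStep_plus (c m : Int) : pvRunStep (c, m) '+' = (c + 1, if c + 1 > m then c + 1 else m) := rfl
theorem pvRunStep_minus (c m : Int) : pvRunStep (c, m) '-' = (0, if 0 > m then 0 else m) := rfl
theorem pvRunStep_eq (c m : Int) : pvRunStep (c, m) '=' = (c, if c > m then c else m) := rfl

theorem fold_pvStepD_eq_marks (ds : List Int) (d c m : Int) :
    ((ds.foldl pvStepD (some d, c, m)).2.2) =
      ((((d :: ds).zip ds).map pvMarkB).foldl pvRunStep (c, m)).2 := by
  induction ds generalizing d c m with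
  | nil => rfl
  | cons e es ih =>
      simp only [List.zip_cons_cons, List.map_cons, List.foldl_cons]
      by_cases h1 : e > d
      · rw [show pvStepD (some d, c, m) e = (some e, c + 1, if c + 1 > m then c + 1 else m) from by
              simp [pvStepD, h1],
            show pvMarkB (d, e) = '+' from by simp [pvMarkB, h1], pvRunStep_plus]
        exact ih e (c + 1) _
      · by_cases h2 : e < d
        · rw [show pvStepD (some d, c, m) e = (some e, 0, if 0 > m then 0 else m) from by
                simp [pvStepD, h1, h2],
              show pvMarkB (d, e) = '-' from by simp [pvMarkB, h1, h2], pvRunStep_minus]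
          exact ih e 0 _
        · rw [show pvStepD (some d, c, m) e = (some e, c, if c > m then c else m) from by
                simp [pvStepD, h1, h2],
              show pvMarkB (d, e) = '=' from by simp [pvMarkB, h1, h2], pvRunStep_eq]
          exact ih e c _

-- structural single-character split (proof-side mirror of marks.split("-"))
def pvSplitChar (d : Char) : List Char → List (List Char)
  | [] => [[]]
  | c :: rest =>
      if c = d then [] :: pvSplitChar d rest
      else
        match pvSplitChar d rest with
        | [] => [[c]]
        | s :: ss => (c :: s) :: ss

theorem pvSplitChar_ne_nil (d : Char) (l : List Char) : pvSplitChar d l ≠ [] := by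
  cases l with
  | nil => simp [pvSplitChar]
  | cons c rest =>
      simp only [pvSplitChar]
      split_ifs
      · simp
      · cases h : pvSplitChar d rest <;> simp

theorem splitOn_go_single (d : Char) (fuel : Nat) :
    ∀ (l cur : List Char) (acc : List (List Char)), l.length < fuel →
      PySem.Chars.splitOn.go [d] fuel l cur acc =
        acc.reverse ++ (match pvSplitChar d l with
                        | [] => []
                        | s :: ss => (cur.reverse ++ s) :: ss) := by
  induction fuel with
  | zero => intro l cur acc h; omega
  | succ f ih =>
      intro l cur acc h
      cases l with
      | nil => simp [PySem.Chars.splitOn.go, pvSplitChar]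
      | cons c rest =>
          by_cases hc : d = c
          · subst hc
            have hpre : List.isPrefixOf [d] (d :: rest) = true := by simp [List.isPrefixOf]
            rw [PySem.Chars.splitOn.go, if_pos hpre]
            simp only [List.length_cons] at h
            rw [ih _ _ _ (by simpa using Nat.lt_of_succ_lt_succ h)]
            have hne := pvSplitChar_ne_nil d rest
            cases hs : pvSplitChar d rest with
            | nil => exact absurd hs hne
            | cons s ss => simp [pvSplitChar, hs]
          · have hpre : List.isPrefixOf [d] (c :: rest) = false := by
              simp [List.isPrefixOf]; exact fun hh => hc hh
            rw [PySem.Chars.splitOn.go, if_neg (by simp [hpre])]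
            simp only [List.length_cons] at h
            rw [ih _ _ _ (Nat.lt_of_succ_lt_succ h)]
            have hne := pvSplitChar_ne_nil d rest
            cases hs : pvSplitChar d rest with
            | nil => exact absurd hs hne
            | cons s ss =>
                simp [pvSplitChar, hs, Ne.symm hc]

theorem splitOn_single (d : Char) (l : List Char) :
    PySem.Chars.splitOn l [d] = pvSplitChar d l := by
  unfold PySem.Chars.splitOn
  rw [splitOn_go_single d (l.length + 1) l [] [] (by omega)]
  have hne := pvSplitChar_ne_nil d l
  cases hs : pvSplitChar d l with
  | nil => exact absurd hs hne
  | cons s ss => simp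

theorem count_go_single (d : Char) (fuel : Nat) :
    ∀ (l : List Char) (acc : Nat), l.length ≤ fuel →
      PySem.Chars.count.go [d] fuel l acc = acc + l.count d := by
  induction fuel with
  | zero =>
      intro l acc h
      have : l = [] := by cases l <;> simp_all
      subst this; simp [PySem.Chars.count.go]
  | succ f ih =>
      intro l acc h
      cases l with
      | nil => simp [PySem.Chars.count.go]
      | cons c rest =>
          by_cases hc : d = c
          · subst hc
            have hpre : List.isPrefixOf [d] (d :: rest) = true := by simp [List.isPrefixOf]
            rw [PySem.Chars.count.go, if_pos hpre]
            simp only [List.length_cons] at h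
            rw [ih _ _ (by simpa using Nat.le_of_succ_le_succ h)]
            simp
            omega
          · have hpre : List.isPrefixOf [d] (c :: rest) = false := by
              simp [List.isPrefixOf]; exact fun hh => hc hh
            rw [PySem.Chars.count.go, if_neg (by simp [hpre])]
            rw [ih _ _ (by simpa using Nat.le_of_succ_le_succ h)]
            simp [Ne.symm hc]

theorem count_single (d : Char) (l : List Char) :
    PySem.Chars.count l [d] = l.count d := by
  unfold PySem.Chars.count
  rw [if_neg (by simp), count_go_single d l.length l 0 (le_refl _)]
  omega

-- the value B computes from the split runs, with the first run's count offset by c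
def pvBest (segs : List (List Char)) (c : Int) : Int :=
  match segs with
  | [] => c
  | s :: rest => (rest.map (fun r => (r.count '+' : Int))).foldl max (c + (s.count '+' : Int))

theorem foldl_max_max (l : List Int) (a b : Int) :
    l.foldl max (max a b) = max a (l.foldl max b) := by
  induction l generalizing b with
  | nil => rfl
  | cons x xs ih => simp only [List.foldl_cons, max_assoc, ih]

theorem init_le_foldl_max (l : List Int) (b : Int) : b ≤ l.foldl max b := by
  induction l generalizing b with
  | nil => simp
  | cons x xs ih => exact le_trans (le_max_left b x) (ih (max b x))

theorem ite_gt_eq_max (a b : Int) : (if a > b then a else b) = max b a := by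
  rw [max_def]; split_ifs <;> omega

theorem marks_fold_eq_best (marks : List Char) :
    ∀ (c m : Int), 0 ≤ c → c ≤ m →
      (marks.foldl pvRunStep (c, m)).2 = max m (pvBest (pvSplitChar '-' marks) c) := by
  induction marks with
  | nil =>
      intro c m hc hcm
      simp [pvBest, pvSplitChar]
      omega
  | cons x xs ih =>
      intro c m hc hcm
      by_cases hx : x = '-'
      · subst hx
        simp only [List.foldl_cons, pvRunStep_minus]
        rw [show (if (0 : Int) > m then (0 : Int) else m) = m from by split_ifs <;> omega]
        rw [ih 0 m le_rfl (by omega)]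
        rw [show pvSplitChar '-' ('-' :: xs) = [] :: pvSplitChar '-' xs from by simp [pvSplitChar]]
        cases hs : pvSplitChar '-' xs with
        | nil => exact absurd hs (pvSplitChar_ne_nil _ _)
        | cons s ss =>
            simp only [pvBest, List.map_cons, List.foldl_cons, List.count_nil, Nat.cast_zero,
              add_zero, zero_add]
            rw [foldl_max_max, ← max_assoc, max_eq_left hcm]
      · cases hs : pvSplitChar '-' xs with
        | nil => exact absurd hs (pvSplitChar_ne_nil _ _)
        | cons s ss =>
        rw [show pvSplitChar '-' (x :: xs) = (x :: s) :: ss from by simp [pvSplitChar, hx, hs]]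
        by_cases hp : x = '+'
        · subst hp
          simp only [List.foldl_cons, pvRunStep_plus]
          rw [ih (c + 1) _ (by omega) (by rw [ite_gt_eq_max]; exact le_max_right m (c+1)),
              ite_gt_eq_max, hs]
          simp only [pvBest, List.count_cons]
          rw [show ((s.count '+' + if '+' == '+' then 1 else 0 : Nat) : Int) = (s.count '+' : Int) + 1 from by
                simp]
          rw [show c + ((s.count '+' : Int) + 1) = c + 1 + (s.count '+' : Int) from by ring]
          rw [max_assoc]
          congr 1
          exact max_eq_right (le_trans (by omega) (init_le_foldl_max _ _))
        · simp only [List.foldl_cons, pvRunStep]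
          rw [show (if x = '+' then c + 1 else if x = '-' then 0 else c) = c from by simp [hp, hx]]
          rw [show (if c > m then c else m) = m from by split_ifs <;> omega]
          rw [ih c m hc hcm, hs]
          simp only [pvBest, List.count_cons]
          rw [show ((s.count '+' + if x == '+' then 1 else 0 : Nat) : Int) = (s.count '+' : Int) from by
                simp [hp]]

-- ===== VERDICT (by name: the statement is the Claim_ definition above) =====
theorem estimate_max_indentation_streak_spec : Claim_equal_estimate_max_indentation_streak := by
  intro content _
  unfold Spec_estimate_max_indentation_streak estimate_max_indentation_streak estimate_max_indentation_streak_alt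
  rw [foldA_filterMap]
  cases h : (PySem.Str.splitlines content).filterMap pvLineDepthB with
  | nil => rfl
  | cons d ds =>
      have hslice : PySem.List.slice (d :: ds) (some 1) none = ds := by
        simpa using PySem.List.slice_from_one (d :: ds)
      simp only [hslice]
      rw [show List.foldl pvStepD (none, 0, 0) (d :: ds) = List.foldl pvStepD (some d, 0, 0) ds from rfl]
      rw [fold_pvStepD_eq_marks ds d 0 0,
          marks_fold_eq_best _ 0 0 le_rfl le_rfl, splitOn_single]
      rw [show (fun run => ((PySem.Chars.count run ['+'] : Nat) : Int)) =
            (fun run => ((run.count '+' : Nat) : Int)) from funext fun r => by rw [count_single]]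
      cases hs : pvSplitChar '-' (((d :: ds).zip ds).map pvMarkB) with
      | nil => exact absurd hs (pvSplitChar_ne_nil _ _)
      | cons s ss =>
          simp only [pvBest, List.map_cons]
          rw [show (0 : Int) + (s.count '+' : Int) = (s.count '+' : Int) from by ring]
          exact max_eq_right (le_trans (by positivity) (init_le_foldl_max _ _))
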